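-- pv_equiv track=rewrite | github.com/phlummox/pptx-to-md | pptx-to-yaml.py | plausible_file_extension
-- ===== SOURCE A (Python) =====
-- def plausible_file_extension(s):
--   """given some string, likely a mime-type,
--   return either a .SOMETHING extension, or an
--   empty string"""
--
--   ext = ""
--
--   l = len(s)
--   for i in range(l-1, -1, -1):
--     if s[i].isalpha():
--       ext = s[i] + ext
--     else:
--       break
--   return ext
-- ===== SOURCE B (Python) =====
-- def plausible_file_extension(s):
--   """given some string, likely a mime-type,
--   return either a .SOMETHING extension, or an
--   empty string"""
--   run = ""
--   for c in s:
--     if c.isalpha():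
--       run += c
--     else:
--       run = ""
--   return run
-- ===== Notes on version B (the rewrite author's own statement) =====
-- stated objective: simpler
-- what changed: Replaces A's backward scan from the end with a break by a single forward pass that appends alphabetic chars to an accumulator and resets it on any non-alphabetic char; A's per-character string prepend is O(n) each so A is quadratic on long alphabetic runs, while B's append is amortised O(1).
import Mathlib
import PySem

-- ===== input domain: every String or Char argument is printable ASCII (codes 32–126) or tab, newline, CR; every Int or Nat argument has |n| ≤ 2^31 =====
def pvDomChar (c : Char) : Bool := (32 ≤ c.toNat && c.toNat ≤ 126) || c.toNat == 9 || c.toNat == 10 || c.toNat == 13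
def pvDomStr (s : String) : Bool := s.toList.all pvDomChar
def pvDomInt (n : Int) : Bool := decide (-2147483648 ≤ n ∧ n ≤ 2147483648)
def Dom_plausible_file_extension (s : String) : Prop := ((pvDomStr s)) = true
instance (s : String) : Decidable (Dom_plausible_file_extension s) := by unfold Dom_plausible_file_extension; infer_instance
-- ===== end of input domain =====

-- B replaces A's backward scan-with-break by a forward pass with a reset-on-non-alpha accumulator (objective: simpler).

-- ===== PORT A =====
-- A walks indices l-1 down to 0, prepending while s[i].isalpha(), breaking at the first
-- non-alphabetic character; modelled as recursion over the reversed character list.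
def pvGoA : List Char → String → String
  | [], ext => ext
  | c :: rest, ext =>
    if PySem.Chars.isalpha c then pvGoA rest (String.mk [c] ++ ext) else ext

def plausible_file_extension (s : String) : String :=
  pvGoA s.toList.reverse ""

-- ===== PORT B =====
def plausible_file_extension_alt (s : String) : String :=
  s.toList.foldl (fun run c => if PySem.Chars.isalpha c then run ++ String.mk [c] else "") ""

-- ===== PRECONDITION & SPEC =====
def Spec_plausible_file_extension (s : String) (out : String) : Prop := out = plausible_file_extension_alt s
instance (s : String) (out : String) : Decidable (Spec_plausible_file_extension s out) := by unfold Spec_plausible_file_extension; infer_instance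

-- ===== CLAIM (what is proved, stated in full; the proofs are below) =====
def Claim_equal_plausible_file_extension : Prop := ∀ (s : String), Dom_plausible_file_extension s → Spec_plausible_file_extension s (plausible_file_extension s)

-- ===== LEMMAS AND PROOFS =====
theorem pvGoA_eq_foldl (l : List Char) (ext : String) :
    pvGoA l.reverse ext =
      l.foldl (fun run c => if PySem.Chars.isalpha c then run ++ String.mk [c] else "") "" ++ ext := by
  induction l using List.reverseRecOn generalizing ext with
  | nil => simp [pvGoA]
  | append_singleton l' c ih =>
    rw [List.reverse_append]
    simp only [List.reverse_singleton, List.singleton_append, List.foldl_append, List.foldl_cons,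
      List.foldl_nil, pvGoA]
    by_cases h : PySem.Chars.isalpha c
    · simp [h, ih, String.append_assoc]
    · simp [h, String.empty_append]

-- ===== VERDICT (by name: the statement is the Claim_ definition above) =====
theorem plausible_file_extension_spec : Claim_equal_plausible_file_extension := by
  intro s _
  unfold Spec_plausible_file_extension plausible_file_extension plausible_file_extension_alt
  rw [pvGoA_eq_foldl]
  simp
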